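-- pv_equiv track=rewrite | github.com/alirezafarashah/Data-Network-Security-Spring-2023 | hw1/sec_hw1/kasiski.py | repeated_tokens
-- ===== SOURCE A (Python) =====
-- def repeated_tokens(words):
--     factors = []
--     for i in range(len(words)):
--         c = 0
--         for j in range(i + 1, len(words)):
--             c += len(words[j])
--             if words[i] == words[j]:
--                 factors.append(c)
--     return factors
-- ===== SOURCE B (Python) =====
-- def repeated_tokens(words):
--     # prefix sums of token lengths + hash-grouping of indices by token;
--     # each output value is a prefix-sum difference, emitted only for indices in the same group
--     pref = [0]
--     s = 0
--     for w in words: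
--         s += len(w)
--         pref.append(s)
--     groups = {}
--     for i, w in enumerate(words):
--         groups.setdefault(w, []).append(i)
--     out = []
--     for i, w in enumerate(words):
--         for j in groups[w]:
--             if j > i:
--                 out.append(pref[j + 1] - pref[i + 1])
--     return out
-- ===== Notes on version B (the rewrite author's own statement) =====
-- stated objective: alternative
-- what changed: Replaces A's double scan with a running inner sum by one pass building prefix sums of token lengths and a dict grouping indices by token, then emitting each distance as a prefix-sum difference only for indices in the same group.
import Mathlib
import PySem

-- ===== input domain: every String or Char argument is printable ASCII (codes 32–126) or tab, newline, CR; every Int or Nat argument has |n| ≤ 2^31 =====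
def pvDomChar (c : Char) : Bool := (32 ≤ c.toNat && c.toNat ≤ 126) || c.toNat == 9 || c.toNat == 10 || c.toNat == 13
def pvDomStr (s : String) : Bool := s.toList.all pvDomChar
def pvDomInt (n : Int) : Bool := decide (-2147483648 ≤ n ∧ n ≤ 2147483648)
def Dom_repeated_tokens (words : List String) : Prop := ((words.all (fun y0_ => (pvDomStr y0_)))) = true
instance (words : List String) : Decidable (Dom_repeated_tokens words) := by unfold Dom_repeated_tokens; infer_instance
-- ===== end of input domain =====

-- B recomputes the same values via prefix sums of token lengths + a dict grouping indices by token (alternative algorithm; same return value).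

-- ===== PORT A =====
def repeated_tokens (words : List String) : List Int :=
  (PySem.List.pyRange 0 (words.length : Int)).foldl (fun factors i =>
    ((PySem.List.pyRange (i + 1) (words.length : Int)).foldl
      (fun (st : Int × List Int) j =>
        let c := st.1 + PySem.Str.len (PySem.List.pyGetD words j "")
        if PySem.List.pyGetD words i "" == PySem.List.pyGetD words j ""
        then (c, st.2 ++ [c]) else (c, st.2))
      (0, factors)).2) []

-- ===== PORT B =====
def repeated_tokens_alt (words : List String) : List Int :=
  let pref := (words.foldl (fun (st : Int × List Int) w =>
      (st.1 + PySem.Str.len w, st.2 ++ [st.1 + PySem.Str.len w])) (0, [0])).2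
  let groups := (PySem.List.enumerate words).foldl
      (fun (d : PySem.Dict String (List Int)) iw => d.insert iw.2 (d.getD iw.2 [] ++ [iw.1]))
      PySem.Dict.empty
  (PySem.List.enumerate words).foldl (fun out iw =>
      (groups.getD iw.2 []).foldl (fun out j =>
        if j > iw.1 then
          out ++ [PySem.List.pyGetD pref (j + 1) 0 - PySem.List.pyGetD pref (iw.1 + 1) 0]
        else out) out) []

-- ===== PRECONDITION & SPEC =====
def Spec_repeated_tokens (words : List String) (out : List Int) : Prop := out = repeated_tokens_alt words
instance (words : List String) (out : List Int) : Decidable (Spec_repeated_tokens words out) := by unfold Spec_repeated_tokens; infer_instance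

-- ===== CLAIM (what is proved, stated in full; the proofs are below) =====
def Claim_equal_repeated_tokens : Prop := ∀ (words : List String), Dom_repeated_tokens words → Spec_repeated_tokens words (repeated_tokens words)

-- ===== LEMMAS AND PROOFS =====

-- sum of the lengths of the first k tokens (Python's prefix sums)
def pvPre (words : List String) (k : Nat) : Int := ((words.take k).map PySem.Str.len).sum

-- the canonical value both programs compute
def pvCanon (words : List String) : List Int :=
  (List.range words.length).flatMap (fun i =>
    ((List.range' (i + 1) (words.length - (i + 1))).filter
        (fun j => words.getD i "" == words.getD j "")).map
      (fun j => pvPre words (j + 1) - pvPre words (i + 1)))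

theorem pvPre_succ (words : List String) (a : Nat) (ha : a < words.length) :
    pvPre words (a + 1) = pvPre words a + PySem.Str.len (words.getD a "") := by
  unfold pvPre
  rw [List.map_take, List.map_take, List.sum_take_succ _ _ (by simpa using ha)]
  simp [List.getD_eq_getElem?_getD, List.getElem?_eq_getElem ha]

theorem pyRange_natCast_natCast (a n : Nat) :
    PySem.List.pyRange (a : Int) (n : Int) = (List.range' a (n - a)).map (fun (k : Nat) => (k : Int)) := by
  by_cases h : a < n
  · induction hf : n - a generalizing a with
    | zero => omega
    | succ m ih =>
      rw [PySem.List.pyRange_one_cons (by exact_mod_cast h)]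
      rw [List.range'_succ]
      simp only [List.map_cons]
      congr 1
      by_cases h2 : a + 1 < n
      · have := ih (a + 1) h2 (by omega)
        rw [show ((a : Int) + 1) = ((a + 1 : Nat) : Int) by push_cast; ring, this]
      · have hm : m = 0 := by omega
        subst hm
        simp only [List.range'_zero, List.map_nil]
        apply List.eq_nil_iff_forall_not_mem.mpr
        intro x hx
        have := PySem.List.mem_pyRange_one.mp hx
        omega
  · have hna : n - a = 0 := by omega
    rw [hna]
    simp only [List.range'_zero, List.map_nil]
    apply List.eq_nil_iff_forall_not_mem.mpr
    intro x hx
    have := PySem.List.mem_pyRange_one.mp hx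
    omega

theorem innerA (words : List String) (wi : String) :
    ∀ (len a : Nat) (c0 : Int) (acc : List Int), a + len ≤ words.length →
    (((List.range' a len).map (fun (k : Nat) => (k : Int))).foldl
      (fun (st : Int × List Int) j =>
        let c := st.1 + PySem.Str.len (PySem.List.pyGetD words j "")
        if wi == PySem.List.pyGetD words j "" then (c, st.2 ++ [c]) else (c, st.2))
      (c0, acc))
    = (c0 + (pvPre words (a + len) - pvPre words a),
       acc ++ ((List.range' a len).filter (fun j => wi == words.getD j "")).map
         (fun j => c0 + (pvPre words (j + 1) - pvPre words a))) := by
  intro len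
  induction len with
  | zero =>
    intro a c0 acc _
    simp
  | succ m ih =>
    intro a c0 acc h
    have ha : a < words.length := by omega
    have hp := pvPre_succ words a ha
    rw [List.range'_succ]
    simp only [List.map_cons, List.foldl_cons, List.filter_cons, PySem.List.pyGetD_natCast]
    by_cases hw : (wi == words.getD a "") = true
    · simp only [hw, if_true]
      rw [ih (a + 1) _ _ (by omega)]
      have hmap : ∀ (l : List Nat),
          l.map (fun j => c0 + PySem.Str.len (words.getD a "") + (pvPre words (j + 1) - pvPre words (a + 1)))
            = l.map (fun j => c0 + (pvPre words (j + 1) - pvPre words a)) := by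
        intro l
        apply List.map_congr_left
        intro j _
        rw [hp]; ring
      rw [Prod.mk.injEq]
      constructor
      · rw [show a + 1 + m = a + (m + 1) from by omega, hp]; ring
      · rw [hmap]
        have hhead : c0 + (pvPre words (a + 1) - pvPre words a)
            = c0 + PySem.Str.len (words.getD a "") := by rw [hp]; ring
        simp [hhead]
    · simp only [hw, Bool.false_eq_true, if_false]
      rw [ih (a + 1) _ _ (by omega)]
      have hmap : ∀ (l : List Nat),
          l.map (fun j => c0 + PySem.Str.len (words.getD a "") + (pvPre words (j + 1) - pvPre words (a + 1)))
            = l.map (fun j => c0 + (pvPre words (j + 1) - pvPre words a)) := by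
        intro l
        apply List.map_congr_left
        intro j _
        rw [hp]; ring
      rw [Prod.mk.injEq]
      constructor
      · rw [show a + 1 + m = a + (m + 1) from by omega, hp]; ring
      · rw [hmap]

theorem A_eq_canon (words : List String) : repeated_tokens words = pvCanon words := by
  unfold repeated_tokens pvCanon
  rw [PySem.List.pyRange_zero_natCast, List.foldl_map]
  rw [PySem.List.foldl_congr_mem (List.range words.length) _
    (fun (acc : List Int) (i : Nat) =>
      acc ++ ((List.range' (i + 1) (words.length - (i + 1))).filter
          (fun j => words.getD i "" == words.getD j "")).map
        (fun j => pvPre words (j + 1) - pvPre words (i + 1))) []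
    ?_]
  · rw [PySem.List.foldl_append_eq_flatMap]
    simp
  · intro acc i hi
    have hi' : i < words.length := List.mem_range.mp hi
    rw [show ((i : Int) + 1) = ((i + 1 : Nat) : Int) from by push_cast; ring]
    rw [pyRange_natCast_natCast (i + 1) words.length]
    simp only [PySem.List.pyGetD_natCast]
    rw [innerA words (words.getD i "") (words.length - (i + 1)) (i + 1) 0 acc (by omega)]
    simp

theorem pref_spec (ws : List String) :
    ∀ (s0 : Int) (l0 : List Int),
    (ws.foldl (fun (st : Int × List Int) w =>
      (st.1 + PySem.Str.len w, st.2 ++ [st.1 + PySem.Str.len w])) (s0, l0))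
    = (s0 + ((ws.map PySem.Str.len).sum),
       l0 ++ (List.range ws.length).map (fun k => s0 + pvPre ws (k + 1))) := by
  induction ws with
  | nil => simp [pvPre]
  | cons w tl ih =>
    intro s0 l0
    simp only [List.foldl_cons, ih]
    rw [Prod.mk.injEq]
    constructor
    · simp; ring
    · rw [List.length_cons, List.range_succ_eq_map]
      simp only [List.map_cons, List.map_map]
      have h0 : pvPre (w :: tl) (0 + 1) = PySem.Str.len w := by simp [pvPre]
      have hs : ∀ k : Nat, pvPre (w :: tl) (k + 1 + 1) = PySem.Str.len w + pvPre tl (k + 1) := by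
        intro k; simp [pvPre]
      simp only [Function.comp_def, Nat.succ_eq_add_one, hs, h0]
      simp [List.append_assoc]
      intro k _
      ring

theorem groups_spec (l : List (Int × String)) :
    ∀ (d : PySem.Dict String (List Int)) (w : String),
    ((l.foldl (fun (d : PySem.Dict String (List Int)) iw =>
        d.insert iw.2 (d.getD iw.2 [] ++ [iw.1])) d).getD w [])
    = d.getD w [] ++ (l.filter (fun iw => iw.2 == w)).map Prod.fst := by
  induction l with
  | nil => simp
  | cons hd tl ih =>
    intro d w
    simp only [List.foldl_cons, List.filter_cons]
    rw [ih]
    by_cases hw : hd.2 = w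
    · subst hw
      simp
    · have : (hd.2 == w) = false := by simp [hw]
      simp [this, PySem.Dict.getD_insert, Ne.symm hw]

theorem enumerate_eq (words : List String) :
    PySem.List.enumerate words = (List.range words.length).map (fun k : Nat => ((k : Int), words.getD k "")) := by
  have gen : ∀ (l : List String) (s : Nat), PySem.List.enumerate l (s : Int)
      = (List.range l.length).map (fun k : Nat => (((s + k : Nat) : Int), l.getD k "")) := by
    intro l
    induction l with
    | nil => intro s; simp [PySem.List.enumerate]
    | cons hd tl ih =>
      intro s
      have hstep : PySem.List.enumerate (hd :: tl) (s : Int)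
          = ((s : Int), hd) :: PySem.List.enumerate tl ((s : Int) + 1) := rfl
      rw [hstep, show ((s : Int) + 1) = ((s + 1 : Nat) : Int) from by push_cast; ring, ih (s + 1)]
      rw [List.length_cons, List.range_succ_eq_map]
      simp only [List.map_cons, List.map_map, Function.comp_def]
      refine List.cons_eq_cons.mpr ⟨by simp, ?_⟩
      apply List.map_congr_left
      intro k _
      have h1 : s + 1 + k = s + (k + 1) := by omega
      simp [Nat.succ_eq_add_one, h1]
  have := gen words 0
  simpa using this

theorem pref_list (words : List String) :
    ((words.foldl (fun (st : Int × List Int) w =>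
      (st.1 + PySem.Str.len w, st.2 ++ [st.1 + PySem.Str.len w])) (0, [0])).2)
    = (List.range (words.length + 1)).map (fun k => pvPre words k) := by
  rw [pref_spec]
  rw [List.range_succ_eq_map]
  simp only [List.map_cons, List.map_map, Function.comp_def, Nat.succ_eq_add_one]
  have h0 : pvPre words 0 = 0 := by simp [pvPre]
  simp [h0]

theorem pref_getD (words : List String) (k : Nat) (hk : k ≤ words.length) :
    PySem.List.pyGetD ((List.range (words.length + 1)).map (fun k => pvPre words k)) (k : Int) 0
    = pvPre words k := by
  rw [PySem.List.pyGetD_natCast, PySem.List.getD_map_range _ _ _ _ (by omega)]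

theorem filter_range_eq (words : List String) (i : Nat) (hi : i < words.length) :
    (List.range words.length).filter
        (fun k => decide (i < k) && (words.getD k "" == words.getD i ""))
    = (List.range' (i + 1) (words.length - (i + 1))).filter
        (fun j => words.getD i "" == words.getD j "") := by
  have hsplit : List.range words.length
      = List.range' 0 (i + 1) ++ List.range' (i + 1) (words.length - (i + 1)) := by
    rw [List.range_eq_range', show words.length = (i + 1) + (words.length - (i + 1)) from by omega]
    have h := List.range'_append (s := 0) (m := i + 1) (n := words.length - (i + 1)) (step := 1)
    simpa using h.symm
  rw [hsplit, List.filter_append]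
  have h1 : (List.range' 0 (i + 1)).filter
      (fun k => decide (i < k) && (words.getD k "" == words.getD i "")) = [] := by
    apply List.filter_eq_nil_iff.mpr
    intro a hmem
    have := List.mem_range'.mp hmem
    simp only [Bool.and_eq_true, decide_eq_true_eq, not_and]
    intro hlt
    omega
  rw [h1, List.nil_append]
  apply List.filter_congr
  intro a hmem
  have hma := List.mem_range'.mp hmem
  have halt : i < a := by omega
  simp [halt]
  exact eq_comm

theorem groups_spec' (words : List String) (w : String) :
    (((List.range words.length).foldl (fun (d : PySem.Dict String (List Int)) (y : Nat) =>
        d.insert (words.getD y "") (d.getD (words.getD y "") [] ++ [(y : Int)]))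
      PySem.Dict.empty).getD w [])
    = ((List.range words.length).filter (fun k => words.getD k "" == w)).map
        (fun k : Nat => (k : Int)) := by
  have h := groups_spec ((List.range words.length).map
    (fun k : Nat => ((k : Int), words.getD k ""))) PySem.Dict.empty w
  rw [List.foldl_map] at h
  simp only [PySem.Dict.getD_empty, List.nil_append, List.filter_map, List.map_map,
    Function.comp_def] at h
  exact h

theorem B_eq_canon (words : List String) : repeated_tokens_alt words = pvCanon words := by
  unfold repeated_tokens_alt pvCanon
  simp only [pref_list, enumerate_eq, List.foldl_map]
  simp only [groups_spec']
  rw [PySem.List.foldl_congr_mem (List.range words.length) _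
    (fun (out : List Int) (i : Nat) =>
      out ++ ((List.range' (i + 1) (words.length - (i + 1))).filter
          (fun j => words.getD i "" == words.getD j "")).map
        (fun j => pvPre words (j + 1) - pvPre words (i + 1))) []
    ?_]
  · rw [PySem.List.foldl_append_eq_flatMap]
    simp
  · intro acc i hi
    have hin : i < words.length := List.mem_range.mp hi
    rw [List.foldl_map]
    rw [PySem.List.foldl_congr_mem _ _
      (fun (out : List Int) (k : Nat) =>
        if (fun k : Nat => decide (i < k)) k = true
        then out ++ [(fun k : Nat => pvPre words (k + 1) - pvPre words (i + 1)) k] else out) acc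
      ?_]
    · rw [PySem.List.foldl_append_if, List.filter_filter, filter_range_eq words i hin]
    · intro out k hk
      have hkn : k < words.length := List.mem_range.mp (List.mem_of_mem_filter hk)
      by_cases hik : i < k
      · rw [if_pos (by exact_mod_cast hik),
          show ((k : Int) + 1) = ((k + 1 : Nat) : Int) from by push_cast; ring,
          pref_getD words (k + 1) (by omega),
          show ((i : Int) + 1) = ((i + 1 : Nat) : Int) from by push_cast; ring,
          pref_getD words (i + 1) (by omega)]
        simp [hik]
      · rw [if_neg (by exact_mod_cast hik)]
        simp [hik]

-- ===== VERDICT (by name: the statement is the Claim_ definition above) =====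
theorem repeated_tokens_spec : Claim_equal_repeated_tokens := by
  intro words _
  unfold Spec_repeated_tokens
  rw [A_eq_canon, B_eq_canon]
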